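-- pv_equiv track=rewrite | github.com/YangyangMiao/DiffTopo | data.py | generate_range_list
-- ===== SOURCE A (Python) =====
-- def generate_range_list(data):
--     range_list = []
--     current_chain = data[0]
--     count = 0
--     for item in data:
--         if item != current_chain:
--             current_chain = item
--             count += 30
--         range_list.append(count)
--         count += 1
--     return range_list
-- ===== SOURCE B (Python) =====
-- def generate_range_list(data):
--     # run-based: for each maximal run of equal items emit a contiguous range,
--     # then advance the base by the run length plus the 30-gap
--     result = []
--     base = 0
--     i = 0
--     n = len(data)
--     while i < n:
--         j = i + 1
--         while j < n and data[j] == data[i]: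
--             j += 1
--         L = j - i
--         result.extend(range(base, base + L))
--         base += L + 30
--         i = j
--     return result
-- ===== Notes on version B (the rewrite author's own statement) =====
-- stated objective: alternative
-- what changed: Replaces the per-element accumulator loop (current-chain tracking, count+=30 on change) with a loop over maximal runs of equal items that emits a contiguous range per run and advances a base offset by run length + 30.
-- outside the precondition, e.g. on generate_range_list([]): A raises IndexError, B returns []
-- crash fix: On the empty list A raises IndexError (data[0]); B returns []. — e.g. on generate_range_list([]): A raises IndexError, B returns []
import Mathlib
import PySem

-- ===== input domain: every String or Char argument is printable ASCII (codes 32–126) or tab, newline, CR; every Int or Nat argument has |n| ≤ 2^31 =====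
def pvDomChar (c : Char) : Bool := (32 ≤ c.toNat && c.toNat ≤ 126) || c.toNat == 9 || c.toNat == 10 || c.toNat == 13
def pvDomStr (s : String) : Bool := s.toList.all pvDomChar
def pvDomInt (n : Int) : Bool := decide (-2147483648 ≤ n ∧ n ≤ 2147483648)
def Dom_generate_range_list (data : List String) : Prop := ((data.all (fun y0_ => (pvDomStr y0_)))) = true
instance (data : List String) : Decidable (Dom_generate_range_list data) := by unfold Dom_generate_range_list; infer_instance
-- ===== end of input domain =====

-- B replaces A's per-element accumulator loop (current-chain tracking, count += 30 on
-- change) by a loop over maximal runs of equal items that emits one contiguous range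
-- per run; objective: alternative decomposition, same O(n) cost.

-- ===== PORT A =====
-- A's for-loop: state = (current_chain, count); appending to range_list = cons.
def pvALoop (l : List String) (cc : String) (cnt : Int) : List Int :=
  match l with
  | [] => []
  | item :: rest =>
    if item != cc then (cnt + 30) :: pvALoop rest item (cnt + 30 + 1)
    else cnt :: pvALoop rest cc (cnt + 1)

def generate_range_list (data : List String) : List Int :=
  match PySem.List.pyGet? data 0 with   -- data[0]: IndexError on [] (excluded by Pre_)
  | none => []
  | some c0 => pvALoop data c0 0

-- ===== PORT B =====
-- B's while loops: scan the current run of elements equal to x, counting its length L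
-- (inner while, j - i); at a run boundary (and at the end) emit range(base, base + L)
-- and restart with base advanced by L + 30 (outer while).
def pvBRun (x : String) (l : List String) (L : Nat) (base : Int) : List Int :=
  match l with
  | [] => PySem.List.pyRange base (base + L) 1
  | y :: rest =>
    if y == x then pvBRun x rest (L + 1) base
    else PySem.List.pyRange base (base + L) 1 ++ pvBRun y rest 1 (base + L + 30)

def generate_range_list_alt (data : List String) : List Int :=
  match data with
  | [] => []
  | x :: rest => pvBRun x rest 1 0

-- ===== PRECONDITION & SPEC =====
-- Pre_ excludes only the empty list, on which A raises IndexError at data[0].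
def Pre_generate_range_list (data : List String) : Prop := data ≠ []
instance (data : List String) : Decidable (Pre_generate_range_list data) := by
  unfold Pre_generate_range_list; infer_instance
def pvWitness_generate_range_list : List String := ["a", "a", "b"]

-- On the empty list A raises IndexError (data[0]); B returns [].
def Raises_generate_range_list (data : List String) : Prop := data = []
instance (data : List String) : Decidable (Raises_generate_range_list data) := by
  unfold Raises_generate_range_list; infer_instance
def pvRaiseWitness_generate_range_list : List String := []
def pvRaiseWitnessOut_generate_range_list : List Int := []

def Spec_generate_range_list (data : List String) (out : List Int) : Prop := out = generate_range_list_alt data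
instance (data : List String) (out : List Int) : Decidable (Spec_generate_range_list data out) := by unfold Spec_generate_range_list; infer_instance

-- ===== CLAIM (what is proved, stated in full; the proofs are below) =====
def Claim_equal_generate_range_list : Prop := ∀ (data : List String), Dom_generate_range_list data → Pre_generate_range_list data → Spec_generate_range_list data (generate_range_list data)
def Claim_raises_generate_range_list : Prop := (∀ (data : List String), Dom_generate_range_list data → Raises_generate_range_list data → ¬ Pre_generate_range_list data) ∧ (Dom_generate_range_list (pvRaiseWitness_generate_range_list) ∧ Raises_generate_range_list (pvRaiseWitness_generate_range_list) ∧ generate_range_list_alt (pvRaiseWitness_generate_range_list) = pvRaiseWitnessOut_generate_range_list)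

-- ===== LEMMAS AND PROOFS =====

-- Invariant tying the two loops: when B is inside a run of elements equal to x with
-- L already counted from base, A's count is base + L; B's pending range for the
-- counted prefix followed by A's continuation is exactly B's continuation.
theorem pvBRun_eq (l : List String) (x : String) (L : Nat) (base : Int) :
    pvBRun x l L base =
      PySem.List.pyRange base (base + L) 1 ++ pvALoop l x (base + L) := by
  induction l generalizing x L base with
  | nil => simp [pvBRun, pvALoop]
  | cons y rest ih =>
    by_cases h : (y == x) = true
    · rw [pvBRun, if_pos h, ih, pvALoop]
      simp only [bne, h, Bool.not_true, Bool.false_eq_true, if_false]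
      have hb : (base : Int) ≤ base + L := by
        have : (0:Int) ≤ (L:Int) := Int.natCast_nonneg _
        omega
      have hcast : base + ((L + 1 : Nat) : Int) = (base + L) + 1 := by push_cast; ring
      rw [hcast, PySem.List.pyRange_one_succ_right hb, List.append_assoc,
        List.singleton_append]
    · rw [pvBRun, if_neg h, ih, pvALoop]
      simp only [bne, h, Bool.not_false, if_true]
      have h1 : base + L + 30 + ((1 : Nat) : Int) = (base + L + 30) + 1 := by push_cast; ring
      rw [h1, PySem.List.pyRange_one_succ_right (le_refl _)]
      simp [PySem.List.pyRange_one]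

-- ===== VERDICT (by name: the statement is the Claim_ definition above) =====
theorem generate_range_list_spec : Claim_equal_generate_range_list := by
  intro data _ hpre
  unfold Spec_generate_range_list
  match data, hpre with
  | x :: rest, _ =>
    show generate_range_list (x :: rest) = generate_range_list_alt (x :: rest)
    unfold generate_range_list generate_range_list_alt
    simp only [PySem.List.pyGet?, PySem.List.pyIdx?]
    norm_num
    rw [pvBRun_eq, pvALoop]
    simp [PySem.List.pyRange_one]

@[simp] theorem generate_range_list_raises : Claim_raises_generate_range_list := by
  unfold Claim_raises_generate_range_list
  exact ⟨fun data _ h => by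
      simp [Raises_generate_range_list] at h
      simp [h, Pre_generate_range_list],
    by decide⟩
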